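-- pv_equiv track=rewrite | github.com/esrayapici/Miuul-Bootcamp | bootcamp_week1_hw1.py | ayir_tek_cift
-- ===== SOURCE A (Python) =====
-- def ayir_tek_cift(liste):
--         teksayilar = []
--         ciftsayilar = []
--         for sayi in liste:
--                 if (sayi % 2 ==0):
--                         ciftsayilar.append(sayi)
--                 else:
--                         teksayilar.append(sayi)
--         return(teksayilar,ciftsayilar)
-- ===== SOURCE B (Python) =====
-- def ayir_tek_cift(liste):
--     teksayilar = [s for s in liste if s % 2]
--     ciftsayilar = [s for s in liste if s % 2 == 0]
--     return (teksayilar, ciftsayilar)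
-- ===== Notes on version B (the rewrite author's own statement) =====
-- stated objective: simpler
-- what changed: Replaces the single branching accumulator loop with two independent filtered comprehensions, one pass per parity.
import Mathlib
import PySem

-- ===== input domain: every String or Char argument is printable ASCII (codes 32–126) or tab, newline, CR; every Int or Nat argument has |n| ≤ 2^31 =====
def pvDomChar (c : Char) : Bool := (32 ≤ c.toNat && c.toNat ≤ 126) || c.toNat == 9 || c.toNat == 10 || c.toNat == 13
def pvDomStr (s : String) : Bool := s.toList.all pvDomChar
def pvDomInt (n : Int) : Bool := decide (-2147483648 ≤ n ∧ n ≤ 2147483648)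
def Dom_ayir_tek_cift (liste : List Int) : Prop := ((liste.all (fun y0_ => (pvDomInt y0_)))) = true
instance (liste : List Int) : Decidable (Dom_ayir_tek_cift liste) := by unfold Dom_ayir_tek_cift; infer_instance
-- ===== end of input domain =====

-- B replaces A's single branching accumulator loop by two independent filter passes (objective: simpler).

-- ===== PORT A =====
-- one pass: branch on parity, append to the matching accumulator
def ayir_tek_cift (liste : List Int) : List Int × List Int :=
  liste.foldl
    (fun acc sayi =>
      if PySem.Int.mod sayi 2 = 0 then (acc.1, acc.2 ++ [sayi])
      else (acc.1 ++ [sayi], acc.2))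
    ([], [])

-- ===== PORT B =====
-- two passes: [s for s in liste if s % 2], [s for s in liste if s % 2 == 0]
def ayir_tek_cift_alt (liste : List Int) : List Int × List Int :=
  (liste.filter (fun s => PySem.Int.mod s 2 ≠ 0),
   liste.filter (fun s => PySem.Int.mod s 2 = 0))

-- ===== PRECONDITION & SPEC =====
def Spec_ayir_tek_cift (liste : List Int) (out : List Int × List Int) : Prop := out = ayir_tek_cift_alt liste
instance (liste : List Int) (out : List Int × List Int) : Decidable (Spec_ayir_tek_cift liste out) := by unfold Spec_ayir_tek_cift; infer_instance

-- ===== CLAIM (what is proved, stated in full; the proofs are below) =====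
def Claim_equal_ayir_tek_cift : Prop := ∀ (liste : List Int), Dom_ayir_tek_cift liste → Spec_ayir_tek_cift liste (ayir_tek_cift liste)

-- ===== LEMMAS AND PROOFS =====

-- loop invariant: A's fold from accumulators (t, c) appends the odd / even filters
theorem ayir_tek_cift_fold_inv (liste t c : List Int) :
    liste.foldl
      (fun acc sayi =>
        if PySem.Int.mod sayi 2 = 0 then (acc.1, acc.2 ++ [sayi])
        else (acc.1 ++ [sayi], acc.2))
      (t, c)
    = (t ++ liste.filter (fun s => PySem.Int.mod s 2 ≠ 0),
       c ++ liste.filter (fun s => PySem.Int.mod s 2 = 0)) := by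
  induction liste generalizing t c with
  | nil => simp
  | cons x xs ih =>
    rw [List.foldl_cons]
    by_cases h : PySem.Int.mod x 2 = 0 <;>
      simp only [h, if_pos, if_neg, List.filter_cons, decide_eq_true_eq,
        ne_eq, not_true_eq_false, not_false_eq_true, decide_true, decide_false,
        ite_true, ite_false, ih] <;>
      simp [List.append_assoc]

-- ===== VERDICT (by name: the statement is the Claim_ definition above) =====
theorem ayir_tek_cift_spec : Claim_equal_ayir_tek_cift := by
  intro liste _
  unfold Spec_ayir_tek_cift ayir_tek_cift ayir_tek_cift_alt
  simpa using ayir_tek_cift_fold_inv liste [] []
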